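-- pv_equiv track=rewrite | github.com/iLikeSalat/autoposter | src/llm_reply_generator.py | _is_unsafe_content
-- ===== SOURCE A (Python) =====
-- def _is_unsafe_content(text: str) -> bool:
--     """Check if reply contains unsafe content.
--
--     Args:
--         text: Text to check
--
--     Returns:
--         True if unsafe, False otherwise
--     """
--     text_lower = text.lower()
--
--     # Explicit sexual content keywords
--     explicit_keywords = [
--         'sex', 'sexual', 'nude', 'naked', 'porn', 'xxx', 'nsfw',
--         'fuck', 'fucking', 'dick', 'cock', 'pussy', 'asshole',
--         'cum', 'orgasm', 'masturbat', 'penetrat'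
--     ]
--
--     # Slurs/insults
--     slur_keywords = [
--         'bitch', 'slut', 'whore', 'cunt', 'retard', 'fag', 'nigger'
--     ]
--
--     # Underage mentions (must never mention being a minor)
--     underage_keywords = [
--         'i\'m a minor', 'i am a minor', 'i\'m underage', 'i am underage',
--         'i\'m under 18', 'i am under 18', 'i\'m 17', 'i am 17',
--         'i\'m 16', 'i am 16', 'i\'m 15', 'i am 15'
--     ]
--
--     # Check for explicit content
--     for keyword in explicit_keywords:
--         if keyword in text_lower:
--             return True
--
--     # Check for slurs
--     for keyword in slur_keywords:
--         if keyword in text_lower: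
--             return True
--
--     # Check for underage mentions
--     for keyword in underage_keywords:
--         if keyword in text_lower:
--             return True
--
--     return False
-- ===== SOURCE B (Python) =====
-- # Suffix scan with tuple-startswith: walk the lowered text position by position
-- # and ask whether any keyword begins at that position, instead of one full
-- # substring scan per keyword.
--
-- _UNSAFE_KEYWORDS = (
--     'sex', 'sexual', 'nude', 'naked', 'porn', 'xxx', 'nsfw',
--     'fuck', 'fucking', 'dick', 'cock', 'pussy', 'asshole',
--     'cum', 'orgasm', 'masturbat', 'penetrat',
--     'bitch', 'slut', 'whore', 'cunt', 'retard', 'fag', 'nigger',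
--     "i'm a minor", 'i am a minor', "i'm underage", 'i am underage',
--     "i'm under 18", 'i am under 18', "i'm 17", 'i am 17',
--     "i'm 16", 'i am 16', "i'm 15", 'i am 15',
-- )
--
--
-- def _is_unsafe_content(text: str) -> bool:
--     t = text.lower()
--     for i in range(len(t)):
--         if t.startswith(_UNSAFE_KEYWORDS, i):
--             return True
--     return False
-- ===== Notes on version B (the rewrite author's own statement) =====
-- stated objective: alternative
-- what changed: Replaces A's three keyword-major loops (one full substring scan of the text per keyword) by a single position-major walk over the lowered text that asks, via tuple-startswith, whether any keyword of one flat tuple begins at the current position.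
import Mathlib
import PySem

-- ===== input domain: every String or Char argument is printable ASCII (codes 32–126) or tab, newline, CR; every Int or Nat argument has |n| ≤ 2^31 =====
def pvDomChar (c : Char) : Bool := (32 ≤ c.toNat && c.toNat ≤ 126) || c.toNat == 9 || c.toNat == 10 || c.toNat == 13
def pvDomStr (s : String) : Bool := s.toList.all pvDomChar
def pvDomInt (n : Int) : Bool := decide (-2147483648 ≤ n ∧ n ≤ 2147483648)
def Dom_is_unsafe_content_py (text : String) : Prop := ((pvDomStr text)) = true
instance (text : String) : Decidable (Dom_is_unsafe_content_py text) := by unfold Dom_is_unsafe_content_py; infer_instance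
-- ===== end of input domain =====

-- B replaces A's three per-keyword substring scans by a single position-major walk
-- of the lowered text, testing at each position whether any keyword begins there
-- (alternative decomposition, same cost class).

-- ===== PORT A =====
def pvExplicitKeywords : List String :=
  ["sex", "sexual", "nude", "naked", "porn", "xxx", "nsfw",
   "fuck", "fucking", "dick", "cock", "pussy", "asshole",
   "cum", "orgasm", "masturbat", "penetrat"]

def pvSlurKeywords : List String :=
  ["bitch", "slut", "whore", "cunt", "retard", "fag", "nigger"]

def pvUnderageKeywords : List String :=
  ["i'm a minor", "i am a minor", "i'm underage", "i am underage",
   "i'm under 18", "i am under 18", "i'm 17", "i am 17",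
   "i'm 16", "i am 16", "i'm 15", "i am 15"]

def is_unsafe_content_py (text : String) : Bool :=
  let text_lower := PySem.Str.lower text
  -- three 'for keyword in …: if keyword in text_lower: return True' loops
  pvExplicitKeywords.any (fun k => PySem.Str.isIn k text_lower) ||
  pvSlurKeywords.any (fun k => PySem.Str.isIn k text_lower) ||
  pvUnderageKeywords.any (fun k => PySem.Str.isIn k text_lower)

-- ===== PORT B =====
def pvAllKeywords : List (List Char) :=
  (["sex", "sexual", "nude", "naked", "porn", "xxx", "nsfw",
    "fuck", "fucking", "dick", "cock", "pussy", "asshole",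
    "cum", "orgasm", "masturbat", "penetrat",
    "bitch", "slut", "whore", "cunt", "retard", "fag", "nigger",
    "i'm a minor", "i am a minor", "i'm underage", "i am underage",
    "i'm under 18", "i am under 18", "i'm 17", "i am 17",
    "i'm 16", "i am 16", "i'm 15", "i am 15"] : List String).map String.toList

-- the 'for i in range(len(t)): if t.startswith(_UNSAFE_KEYWORDS, i): return True' loop,
-- as structural recursion over the successive suffixes of t
def pvScan : List Char → Bool
  | [] => false
  | c :: rest =>
    if pvAllKeywords.any (fun k => k.isPrefixOf (c :: rest)) then true
    else pvScan rest

def is_unsafe_content_py_alt (text : String) : Bool :=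
  pvScan (PySem.Chars.lower text.toList)

-- ===== PRECONDITION & SPEC =====
def Spec_is_unsafe_content_py (text : String) (out : Bool) : Prop := out = is_unsafe_content_py_alt text
instance (text : String) (out : Bool) : Decidable (Spec_is_unsafe_content_py text out) := by unfold Spec_is_unsafe_content_py; infer_instance

-- ===== CLAIM (what is proved, stated in full; the proofs are below) =====
def Claim_equal_is_unsafe_content_py : Prop := ∀ (text : String), Dom_is_unsafe_content_py text → Spec_is_unsafe_content_py text (is_unsafe_content_py text)

-- ===== LEMMAS AND PROOFS =====

-- every keyword is nonempty
lemma pv_keywords_ne_nil : ∀ k ∈ pvAllKeywords, k ≠ [] := by decide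

-- the suffix scan finds a keyword iff some keyword is an infix of t
lemma pvScan_iff (t : List Char) :
    pvScan t = true ↔ ∃ k ∈ pvAllKeywords, k <:+: t := by
  induction t with
  | nil =>
    refine iff_of_false (by simp [pvScan]) ?_
    rintro ⟨k, hk, hinf⟩
    exact pv_keywords_ne_nil k hk (List.eq_nil_of_infix_nil hinf)
  | cons c rest ih =>
    simp only [pvScan]
    split
    · rename_i h
      simp only [List.any_eq_true, List.isPrefixOf_iff_prefix] at h
      obtain ⟨k, hk, hp⟩ := h
      exact iff_of_true rfl ⟨k, hk, hp.isInfix⟩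
    · rename_i h
      simp only [List.any_eq_true, List.isPrefixOf_iff_prefix, not_exists, not_and] at h
      rw [ih]
      constructor
      · rintro ⟨k, hk, hinf⟩
        exact ⟨k, hk, hinf.trans (List.suffix_cons c rest).isInfix⟩
      · rintro ⟨k, hk, hinf⟩
        rcases List.infix_cons_iff.mp hinf with hp | hinf'
        · exact absurd hp (h k hk)
        · exact ⟨k, hk, hinf'⟩

theorem is_unsafe_content_py_eq (text : String) :
    is_unsafe_content_py text = is_unsafe_content_py_alt text := by
  unfold is_unsafe_content_py is_unsafe_content_py_alt
  rw [Bool.eq_iff_iff, pvScan_iff, ← PySem.Str.toList_lower]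
  have hall : pvAllKeywords =
      (pvExplicitKeywords ++ pvSlurKeywords ++ pvUnderageKeywords).map String.toList := rfl
  simp only [hall, Bool.or_eq_true, List.any_eq_true, List.mem_append, List.mem_map,
    PySem.Str.isIn_iff_infix]
  constructor
  · rintro ((⟨k, hk, h⟩ | ⟨k, hk, h⟩) | ⟨k, hk, h⟩)
    · exact ⟨k.toList, ⟨k, Or.inl (Or.inl hk), rfl⟩, h⟩
    · exact ⟨k.toList, ⟨k, Or.inl (Or.inr hk), rfl⟩, h⟩
    · exact ⟨k.toList, ⟨k, Or.inr hk, rfl⟩, h⟩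
  · rintro ⟨_, ⟨k, hk, rfl⟩, h⟩
    rcases hk with (hk | hk) | hk
    · exact Or.inl (Or.inl ⟨k, hk, h⟩)
    · exact Or.inl (Or.inr ⟨k, hk, h⟩)
    · exact Or.inr ⟨k, hk, h⟩

-- ===== VERDICT (by name: the statement is the Claim_ definition above) =====
theorem is_unsafe_content_py_spec : Claim_equal_is_unsafe_content_py := by
  intro text _
  show is_unsafe_content_py text = is_unsafe_content_py_alt text
  exact is_unsafe_content_py_eq text
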